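-- pv_equiv track=rewrite | github.com/ninohiro/detry | detry.py | parse_exec
-- ===== SOURCE A (Python) =====
-- class ParseError(Exception):
--     pass
--
-- def parse_exec(s):
--     quoted=False
--     backslash=False
--     a=''
--     l=[]
--     for c in s:
--         if quoted:
--             if backslash:
--                 if c in '\"`$\\':
--                     a+=c
--                 else:
--                     a+='\\'+c
--                 backslash=False
--             elif c=='\\':
--                 backslash=True
--             elif c=='\"':
--                 quoted=False
--             else:
--                 a+=c
--         else:
--             if c=='\"':
--                 quoted=True
--             elif c==' ':
--                 if a!='':
--                     l+=[a]
--                     a=''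
--             else:
--                 a+=c
--     if quoted:
--         raise ParseError
--     if a!='':
--         l+=[a]
--     return l
-- ===== SOURCE B (Python) =====
-- class ParseError(Exception):
--     pass
--
-- def parse_exec(s):
--     l = []
--     buf = []
--     i = 0
--     n = len(s)
--     while i < n:
--         c = s[i]; i += 1
--         if c == ' ':
--             if buf:
--                 l.append(''.join(buf))
--                 buf = []
--         elif c == '"':
--             while True:
--                 if i >= n:
--                     raise ParseError
--                 c = s[i]; i += 1
--                 if c == '"':
--                     break
--                 if c == '\\':
--                     if i >= n:
--                         raise ParseError
--                     d = s[i]; i += 1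
--                     if d in '"`$\\':
--                         buf.append(d)
--                     else:
--                         buf.append('\\'); buf.append(d)
--                 else:
--                     buf.append(c)
--         else:
--             buf.append(c)
--     if buf:
--         l.append(''.join(buf))
--     return l
-- ===== Notes on version B (the rewrite author's own statement) =====
-- stated objective: alternative
-- what changed: Replaced A's single for-loop with quoted/backslash state flags by an index-free outer token loop that, on a double quote, dispatches to a nested inner loop consuming the whole quoted section (handling backslash escapes by reading the next character directly) before returning to the outer loop.
import Mathlib
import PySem

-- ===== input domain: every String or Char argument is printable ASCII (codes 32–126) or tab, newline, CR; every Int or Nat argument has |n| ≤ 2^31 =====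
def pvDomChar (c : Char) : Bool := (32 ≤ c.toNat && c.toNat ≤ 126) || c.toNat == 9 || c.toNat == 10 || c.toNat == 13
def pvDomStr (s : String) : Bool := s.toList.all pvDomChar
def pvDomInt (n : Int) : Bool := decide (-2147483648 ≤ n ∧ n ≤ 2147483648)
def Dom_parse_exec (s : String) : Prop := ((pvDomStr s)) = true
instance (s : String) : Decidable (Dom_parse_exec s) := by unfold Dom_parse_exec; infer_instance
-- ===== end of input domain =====

-- B rewrites A's flag-based state machine as an outer token loop with a nested quote-consuming
-- inner loop (objective: alternative decomposition, same single-pass cost).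

-- ===== PORT A =====
-- A's for-loop over the characters with state (quoted, backslash, a, l); on the ParseError
-- path (unterminated quote, excluded by Pre_) the port returns [].
def parse_exec_go (cs : List Char) (quoted backslash : Bool) (a : List Char) (l : List String) : List String :=
  match cs with
  | [] => if quoted then [] else if a ≠ [] then l ++ [String.mk a] else l
  | c :: cs =>
    if quoted then
      if backslash then
        if c = '"' ∨ c = '`' ∨ c = '$' ∨ c = '\\' then
          parse_exec_go cs true false (a ++ [c]) l
        else
          parse_exec_go cs true false (a ++ ['\\', c]) l
      else if c = '\\' then parse_exec_go cs true true a l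
      else if c = '"' then parse_exec_go cs false backslash a l
      else parse_exec_go cs true backslash (a ++ [c]) l
    else
      if c = '"' then parse_exec_go cs true backslash a l
      else if c = ' ' then
        if a ≠ [] then parse_exec_go cs quoted backslash [] (l ++ [String.mk a])
        else parse_exec_go cs quoted backslash a l
      else parse_exec_go cs quoted backslash (a ++ [c]) l

def parse_exec (s : String) : List String := parse_exec_go s.toList false false [] []

-- ===== PORT B =====
-- B's inner quote loop: consumes characters up to the closing quote, handling '\' escapes;
-- returns the extended buffer and the rest of the input, or none where B raises ParseError.
def pe_inner (cs : List Char) (buf : List Char) : Option (List Char × List Char) :=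
  match cs with
  | [] => none
  | c :: cs =>
    if c = '"' then some (buf, cs)
    else if c = '\\' then
      match cs with
      | [] => none
      | d :: cs' =>
        if d = '"' ∨ d = '`' ∨ d = '$' ∨ d = '\\' then pe_inner cs' (buf ++ [d])
        else pe_inner cs' (buf ++ ['\\', d])
    else pe_inner cs (buf ++ [c])

theorem pe_inner_length_aux : ∀ (n : Nat) (cs buf a' r : List Char), cs.length ≤ n →
    pe_inner cs buf = some (a', r) → r.length < cs.length := by
  intro n
  induction n with
  | zero =>
    intro cs buf a' r hlen h
    have : cs = [] := List.eq_nil_of_length_eq_zero (Nat.le_zero.mp hlen)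
    subst this; rw [pe_inner.eq_def] at h; simp at h
  | succ n ih =>
    intro cs buf a' r hlen h
    match cs with
    | [] => rw [pe_inner.eq_def] at h; simp at h
    | c :: cs =>
      rw [pe_inner.eq_def] at h
      simp only [] at h
      by_cases hq : c = '"'
      · rw [if_pos hq] at h
        simp at h
        simp [← h.2]
      · rw [if_neg hq] at h
        by_cases hb : c = '\\'
        · rw [if_pos hb] at h
          match cs with
          | [] => simp at h
          | d :: cs' =>
            have hlen' : cs'.length ≤ n := by simp at hlen; omega
            simp only [] at h
            by_cases hd : d = '"' ∨ d = '`' ∨ d = '$' ∨ d = '\\'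
            · rw [if_pos hd] at h
              have := ih cs' _ _ _ hlen' h
              simp; omega
            · rw [if_neg hd] at h
              have := ih cs' _ _ _ hlen' h
              simp; omega
        · rw [if_neg hb] at h
          have hlen' : cs.length ≤ n := by simp at hlen; omega
          have := ih cs _ _ _ hlen' h
          simp; omega

theorem pe_inner_length (cs buf a' r : List Char) (h : pe_inner cs buf = some (a', r)) :
    r.length < cs.length :=
  pe_inner_length_aux cs.length cs buf a' r le_rfl h

-- B's outer loop: flush the buffer on space, dispatch to pe_inner on '"', else accumulate.
def pe_outer (cs : List Char) (buf : List Char) (l : List String) : List String :=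
  match cs with
  | [] => if buf = [] then l else l ++ [String.mk buf]
  | c :: cs =>
    if c = ' ' then
      if buf = [] then pe_outer cs buf l
      else pe_outer cs [] (l ++ [String.mk buf])
    else if c = '"' then
      match h : pe_inner cs buf with
      | none => []
      | some (buf', rest) => pe_outer rest buf' l
    else pe_outer cs (buf ++ [c]) l
termination_by cs.length
decreasing_by
  · simp
  · simp
  · have := pe_inner_length _ _ _ _ h; simp; omega
  · simp

def parse_exec_alt (s : String) : List String := pe_outer s.toList [] []

-- ===== PRECONDITION & SPEC =====
-- Balanced-quoting shape condition: wfTok cs q checks that every double quote opened (q = inside-quote flag) is closed, where a '\' inside quotes escapes the next character.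
def wfTok : List Char → Bool → Bool → Bool
  | [], q, _ => !q
  | c :: cs, q, b =>
    if q then
      if b then wfTok cs true false
      else if c = '"' then wfTok cs false false
      else if c = '\\' then wfTok cs true true
      else wfTok cs true false
    else if c = '"' then wfTok cs true false else wfTok cs false false

-- Pre_ excludes exactly the strings with an unterminated double quote, on which A raises ParseError.
def Pre_parse_exec (s : String) : Prop := wfTok s.toList false false = true
instance (s : String) : Decidable (Pre_parse_exec s) := by unfold Pre_parse_exec; infer_instance

def pvWitness_parse_exec : String := "ab \"c d\\$ e\"x  f"

def Spec_parse_exec (s : String) (out : List String) : Prop := out = parse_exec_alt s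
instance (s : String) (out : List String) : Decidable (Spec_parse_exec s out) := by unfold Spec_parse_exec; infer_instance

-- ===== CLAIM (what is proved, stated in full; the proofs are below) =====
def Claim_equal_parse_exec : Prop := ∀ (s : String), Dom_parse_exec s → Pre_parse_exec s → Spec_parse_exec s (parse_exec s)

-- ===== LEMMAS AND PROOFS =====

-- small unfolding lemmas for the three states of A's machine and for B's two loops
theorem goO_nil (a : List Char) (l : List String) :
    parse_exec_go [] false false a l = if a ≠ [] then l ++ [String.mk a] else l := by
  rw [parse_exec_go.eq_def]; simp
theorem goO_cons (c : Char) (cs a : List Char) (l : List String) :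
    parse_exec_go (c :: cs) false false a l =
      if c = '"' then parse_exec_go cs true false a l
      else if c = ' ' then
        (if a ≠ [] then parse_exec_go cs false false [] (l ++ [String.mk a])
         else parse_exec_go cs false false a l)
      else parse_exec_go cs false false (a ++ [c]) l := by
  rw [parse_exec_go.eq_def]; simp
theorem goQ_cons (c : Char) (cs a : List Char) (l : List String) :
    parse_exec_go (c :: cs) true false a l =
      if c = '\\' then parse_exec_go cs true true a l
      else if c = '"' then parse_exec_go cs false false a l
      else parse_exec_go cs true false (a ++ [c]) l := by
  rw [parse_exec_go.eq_def]; simp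
theorem goB_cons (c : Char) (cs a : List Char) (l : List String) :
    parse_exec_go (c :: cs) true true a l =
      if c = '"' ∨ c = '`' ∨ c = '$' ∨ c = '\\' then parse_exec_go cs true false (a ++ [c]) l
      else parse_exec_go cs true false (a ++ ['\\', c]) l := by
  rw [parse_exec_go.eq_def]; simp
theorem peo_nil (buf : List Char) (l : List String) :
    pe_outer [] buf l = if buf = [] then l else l ++ [String.mk buf] := by
  rw [pe_outer.eq_def]
theorem pe_outer_quote (cs buf : List Char) (l : List String) :
    pe_outer ('"' :: cs) buf l =
      (match pe_inner cs buf with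
       | none => []
       | some (buf', rest) => pe_outer rest buf' l) := by
  rw [pe_outer.eq_def]
  simp only [reduceIte]
  rcases h : pe_inner cs buf with _ | ⟨b, r⟩ <;> simp
theorem peo_cons (c : Char) (cs buf : List Char) (l : List String) (hq : c ≠ '"') :
    pe_outer (c :: cs) buf l =
      if c = ' ' then
        (if buf = [] then pe_outer cs buf l else pe_outer cs [] (l ++ [String.mk buf]))
      else pe_outer cs (buf ++ [c]) l := by
  rw [pe_outer.eq_def]; simp [hq]
theorem pei_quote (cs buf : List Char) : pe_inner ('"' :: cs) buf = some (buf, cs) := by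
  rw [pe_inner.eq_def]; simp
theorem pei_bs (d : Char) (cs' buf : List Char) :
    pe_inner ('\\' :: d :: cs') buf =
      if d = '"' ∨ d = '`' ∨ d = '$' ∨ d = '\\' then pe_inner cs' (buf ++ [d])
      else pe_inner cs' (buf ++ ['\\', d]) := by
  rw [pe_inner.eq_def]; simp
theorem pei_other (c : Char) (cs buf : List Char) (hq : c ≠ '"') (hb : c ≠ '\\') :
    pe_inner (c :: cs) buf = pe_inner cs (buf ++ [c]) := by
  rw [pe_inner.eq_def]; simp [hq, hb]
theorem wfO_cons (c : Char) (cs : List Char) :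
    wfTok (c :: cs) false false = if c = '"' then wfTok cs true false else wfTok cs false false := by
  rw [wfTok.eq_def]; simp
theorem wfQ_quote (cs : List Char) : wfTok ('"' :: cs) true false = wfTok cs false false := by
  rw [wfTok.eq_def]; simp
theorem wfQ_bs (d : Char) (cs' : List Char) : wfTok ('\\' :: d :: cs') true false = wfTok cs' true false := by
  rw [wfTok.eq_def]; simp
  rw [wfTok.eq_def]; simp
theorem wfQ_other (c : Char) (cs : List Char) (hq : c ≠ '"') (hb : c ≠ '\\') :
    wfTok (c :: cs) true false = wfTok cs true false := by
  rw [wfTok.eq_def]; simp [hq, hb]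

theorem pe_main : ∀ (n : Nat) (cs : List Char), cs.length ≤ n →
    (∀ a l, wfTok cs false false = true → parse_exec_go cs false false a l = pe_outer cs a l) ∧
    (∀ a l, wfTok cs true false = true →
      parse_exec_go cs true false a l =
        (match pe_inner cs a with
         | none => []
         | some (buf', rest) => pe_outer rest buf' l)) := by
  intro n
  induction n with
  | zero =>
    intro cs hlen
    have hcs : cs = [] := List.eq_nil_of_length_eq_zero (Nat.le_zero.mp hlen)
    subst hcs
    refine ⟨fun a l _ => ?_, fun a l hq => by rw [wfTok.eq_def] at hq; simp at hq⟩
    rw [goO_nil, peo_nil]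
    by_cases ha : a = [] <;> simp [ha]
  | succ n ih =>
    intro cs hlen
    match cs with
    | [] =>
      refine ⟨fun a l _ => ?_, fun a l hq => by rw [wfTok.eq_def] at hq; simp at hq⟩
      rw [goO_nil, peo_nil]
      by_cases ha : a = [] <;> simp [ha]
    | c :: cs =>
      have hlen' : cs.length ≤ n := by simp at hlen; omega
      constructor
      · intro a l hw
        rw [wfO_cons] at hw
        rw [goO_cons]
        by_cases hq : c = '"'
        · subst hq
          rw [if_pos rfl] at hw
          rw [if_pos rfl, pe_outer_quote]
          exact (ih cs hlen').2 a l hw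
        · rw [if_neg hq] at hw
          rw [if_neg hq, peo_cons c cs a l hq]
          by_cases hsp : c = ' '
          · rw [if_pos hsp, if_pos hsp]
            by_cases ha : a = []
            · simp only [ha, ne_eq, not_true_eq_false, if_false]
              exact (ih cs hlen').1 [] l hw
            · simp only [ne_eq, ha, not_false_eq_true, if_true]
              exact (ih cs hlen').1 [] (l ++ [String.mk a]) hw
          · rw [if_neg hsp, if_neg hsp]
            exact (ih cs hlen').1 (a ++ [c]) l hw
      · intro a l hq
        by_cases hdq : c = '"'
        · subst hdq
          rw [wfQ_quote] at hq
          rw [goQ_cons, if_neg (by decide : ¬('"' = '\\')), if_pos rfl, pei_quote]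
          exact (ih cs hlen').1 a l hq
        · by_cases hbs : c = '\\'
          · subst hbs
            rw [goQ_cons, if_pos rfl]
            match cs with
            | [] =>
              rw [wfTok.eq_def] at hq; simp at hq
              rw [wfTok.eq_def] at hq; simp at hq
            | d :: cs' =>
              have hlen'' : cs'.length ≤ n := by simp at hlen; omega
              rw [wfQ_bs] at hq
              rw [goB_cons, pei_bs]
              by_cases hd : d = '"' ∨ d = '`' ∨ d = '$' ∨ d = '\\'
              · rw [if_pos hd, if_pos hd]
                exact (ih cs' hlen'').2 (a ++ [d]) l hq
              · rw [if_neg hd, if_neg hd]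
                exact (ih cs' hlen'').2 (a ++ ['\\', d]) l hq
          · rw [wfQ_other c cs hdq hbs] at hq
            rw [goQ_cons, if_neg hbs, if_neg hdq, pei_other c cs a hdq hbs]
            exact (ih cs hlen').2 (a ++ [c]) l hq

-- ===== VERDICT (by name: the statement is the Claim_ definition above) =====
theorem parse_exec_spec : Claim_equal_parse_exec := by
  intro s _ hpre
  unfold Spec_parse_exec parse_exec parse_exec_alt
  exact (pe_main s.toList.length s.toList le_rfl).1 [] [] hpre
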